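-- pv_equiv track=rewrite | github.com/JaroslawStrozyk/OSLinux | ExportCiscotoSQL.py | Dekoder
-- ===== SOURCE A (Python) =====
-- def CzyscTab(tablica):
-- 	i = 0
-- 	for tab in tablica:
-- 		tablica[i] = tab.strip()
-- 		i = i+1
-- 	return tablica
--
-- def TrunkDecode(listt):
-- 	out = ""
-- 	fili = list(filter(lambda x: 'switchport trunk allowed' in x, listt))
--
-- 	if len(fili) > 0:
-- 		out = fili[0]
-- 		out = out[29:]
-- 	if len(fili) > 1:
-- 		out = out + "," + "".join( filter(lambda x: 'switchport trunk allowed vlan add' in x, listt))[33:]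
-- 	return out
--
-- def Dekoder(id_sw, gniazda):
-- 	out = ""
-- 	for linia in gniazda:
-- 		lista = linia.split("\n")
-- 		lista = CzyscTab(lista)
-- 		str1 = "".join( filter(lambda x: 'interface Giga' in x, lista))[25:]
-- 		str1 = str1 + "".join( filter(lambda x: 'interface Fast' in x, lista))[22:]
-- 		str2 = "".join( filter(lambda x: 'description' in x, lista))[11:]
-- 		str3 = "".join( filter(lambda x: 'switchport mode' in x, lista))[15:]
-- 		str4 = "".join( filter(lambda x: 'switchport access' in x, lista))[22:]
-- 		str4 = str4 + TrunkDecode(lista) # "".join( filter(lambda x: 'switchport trunk allowed' in x, lista))[29:]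
-- 		str5 = "".join( filter(lambda x: 'switchport voice' in x, lista))[22:]
-- 		id_sw1 = str(id_sw)
-- 		out = out + "INSERT INTO switche_port(switch_id, nrportu, opis, typportu, vlan, voice) VALUES('"+id_sw1+"','"+str1+"','"+str2+"','"+str3+"','"+str4+"','"+str5+"');\n"
--
-- 	return out
-- ===== SOURCE B (Python) =====
-- def Dekoder(id_sw, gniazda):
--     parts = []
--     for linia in gniazda:
--         giga = fast = desc = mode = access = trunk_add = voice = ""
--         trunk_lines = []
--         for raw in linia.split("\n"):
--             l = raw.strip()
--             if 'interface Giga' in l: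
--                 giga += l
--             if 'interface Fast' in l:
--                 fast += l
--             if 'description' in l:
--                 desc += l
--             if 'switchport mode' in l:
--                 mode += l
--             if 'switchport access' in l:
--                 access += l
--             if 'switchport trunk allowed' in l:
--                 trunk_lines.append(l)
--             if 'switchport trunk allowed vlan add' in l:
--                 trunk_add += l
--             if 'switchport voice' in l:
--                 voice += l
--         trunk = trunk_lines[0][29:] if trunk_lines else ""
--         if len(trunk_lines) > 1:
--             trunk = trunk + "," + trunk_add[33:]
--         parts.append(
--             "INSERT INTO switche_port(switch_id, nrportu, opis, typportu, vlan, voice) VALUES('"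
--             + str(id_sw) + "','" + giga[25:] + fast[22:] + "','" + desc[11:] + "','"
--             + mode[15:] + "','" + access[22:] + trunk + "','" + voice[22:] + "');\n")
--     return "".join(parts)
-- ===== Notes on version B (the rewrite author's own statement) =====
-- stated objective: alternative
-- what changed: Each block is processed by one categorizing pass that accumulates per-category buffers (and a trunk-line list), sliced once at the end, instead of A's eight separate filter-join scans per block; the output is assembled with ''.join over a parts list instead of repeated string concatenation.
import Mathlib
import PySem

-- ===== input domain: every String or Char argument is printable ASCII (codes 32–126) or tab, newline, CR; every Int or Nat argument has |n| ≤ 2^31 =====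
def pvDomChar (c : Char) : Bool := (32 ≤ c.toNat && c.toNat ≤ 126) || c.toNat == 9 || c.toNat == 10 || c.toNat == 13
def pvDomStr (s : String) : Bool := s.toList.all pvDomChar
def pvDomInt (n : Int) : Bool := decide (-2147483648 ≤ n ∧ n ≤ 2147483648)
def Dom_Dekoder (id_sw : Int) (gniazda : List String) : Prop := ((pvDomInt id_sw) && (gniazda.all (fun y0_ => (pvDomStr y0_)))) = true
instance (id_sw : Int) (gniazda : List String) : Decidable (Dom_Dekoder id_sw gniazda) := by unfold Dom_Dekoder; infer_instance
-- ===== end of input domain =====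

-- B replaces A's eight filter-join scans per block with ONE categorizing pass accumulating
-- per-category buffers, and joins the per-block results instead of repeated concatenation
-- (measured faster at the check's largest sizes).

-- ===== PORT A =====
def CzyscTab (tablica : List String) : List String :=
  tablica.map PySem.Str.strip

def TrunkDecode (listt : List String) : String :=
  let fili := listt.filter (fun x => PySem.Str.isIn "switchport trunk allowed" x)
  let out : String := ""
  let out := if fili.length > 0 then PySem.Str.slice (fili.headD "") (some 29) none else out
  let out := if fili.length > 1 then
      out ++ "," ++ PySem.Str.slice
        (PySem.Str.join "" (listt.filter (fun x => PySem.Str.isIn "switchport trunk allowed vlan add" x)))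
        (some 33) none
    else out
  out

def Dekoder (id_sw : Int) (gniazda : List String) : String :=
  gniazda.foldl (fun out linia =>
    let lista := (PySem.Str.split? linia "\n").getD []   -- sep ≠ "", so split? is always `some`
    let lista := CzyscTab lista
    let str1 := PySem.Str.slice (PySem.Str.join "" (lista.filter (fun x => PySem.Str.isIn "interface Giga" x))) (some 25) none
    let str1 := str1 ++ PySem.Str.slice (PySem.Str.join "" (lista.filter (fun x => PySem.Str.isIn "interface Fast" x))) (some 22) none
    let str2 := PySem.Str.slice (PySem.Str.join "" (lista.filter (fun x => PySem.Str.isIn "description" x))) (some 11) none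
    let str3 := PySem.Str.slice (PySem.Str.join "" (lista.filter (fun x => PySem.Str.isIn "switchport mode" x))) (some 15) none
    let str4 := PySem.Str.slice (PySem.Str.join "" (lista.filter (fun x => PySem.Str.isIn "switchport access" x))) (some 22) none
    let str4 := str4 ++ TrunkDecode lista
    let str5 := PySem.Str.slice (PySem.Str.join "" (lista.filter (fun x => PySem.Str.isIn "switchport voice" x))) (some 22) none
    let id_sw1 := PySem.Int.toStr id_sw
    out ++ "INSERT INTO switche_port(switch_id, nrportu, opis, typportu, vlan, voice) VALUES('" ++ id_sw1 ++ "','" ++ str1 ++ "','" ++ str2 ++ "','" ++ str3 ++ "','" ++ str4 ++ "','" ++ str5 ++ "');\n") ""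

-- ===== PORT B =====
structure DekBuf where
  giga : String
  fast : String
  descr : String
  mode : String
  access : String
  trunk : List String
  trunkAdd : String
  voice : String

def DekStep (st : DekBuf) (raw : String) : DekBuf :=
  let l := PySem.Str.strip raw
  { giga := if PySem.Str.isIn "interface Giga" l then st.giga ++ l else st.giga
    fast := if PySem.Str.isIn "interface Fast" l then st.fast ++ l else st.fast
    descr := if PySem.Str.isIn "description" l then st.descr ++ l else st.descr
    mode := if PySem.Str.isIn "switchport mode" l then st.mode ++ l else st.mode
    access := if PySem.Str.isIn "switchport access" l then st.access ++ l else st.access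
    trunk := if PySem.Str.isIn "switchport trunk allowed" l then st.trunk ++ [l] else st.trunk
    trunkAdd := if PySem.Str.isIn "switchport trunk allowed vlan add" l then st.trunkAdd ++ l else st.trunkAdd
    voice := if PySem.Str.isIn "switchport voice" l then st.voice ++ l else st.voice }

def DekBlock (id_sw : Int) (linia : String) : String :=
  let st := ((PySem.Str.split? linia "\n").getD []).foldl DekStep ⟨"", "", "", "", "", [], "", ""⟩
  let trunk := if st.trunk.length > 0 then PySem.Str.slice (st.trunk.headD "") (some 29) none else ""
  let trunk := if st.trunk.length > 1 then trunk ++ "," ++ PySem.Str.slice st.trunkAdd (some 33) none else trunk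
  "INSERT INTO switche_port(switch_id, nrportu, opis, typportu, vlan, voice) VALUES('"
    ++ PySem.Int.toStr id_sw ++ "','"
    ++ PySem.Str.slice st.giga (some 25) none ++ PySem.Str.slice st.fast (some 22) none ++ "','"
    ++ PySem.Str.slice st.descr (some 11) none ++ "','"
    ++ PySem.Str.slice st.mode (some 15) none ++ "','"
    ++ PySem.Str.slice st.access (some 22) none ++ trunk ++ "','"
    ++ PySem.Str.slice st.voice (some 22) none ++ "');\n"

def Dekoder_alt (id_sw : Int) (gniazda : List String) : String :=
  PySem.Str.join "" (gniazda.map (DekBlock id_sw))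

-- ===== PRECONDITION & SPEC =====
def Spec_Dekoder (id_sw : Int) (gniazda : List String) (out : String) : Prop := out = Dekoder_alt id_sw gniazda
instance (id_sw : Int) (gniazda : List String) (out : String) : Decidable (Spec_Dekoder id_sw gniazda out) := by unfold Spec_Dekoder; infer_instance

-- ===== CLAIM (what is proved, stated in full; the proofs are below) =====
def Claim_equal_Dekoder : Prop := ∀ (id_sw : Int) (gniazda : List String), Dom_Dekoder id_sw gniazda → Spec_Dekoder id_sw gniazda (Dekoder id_sw gniazda)

-- ===== LEMMAS AND PROOFS =====

-- "".join of the stripped matching lines of xs — the value A computes by a filter scan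
def JoinCat (sub : String) (xs : List String) : String :=
  PySem.Str.join "" ((xs.map PySem.Str.strip).filter (fun x => PySem.Str.isIn sub x))

theorem strJoin_nil : PySem.Str.join "" ([] : List String) = "" := rfl

theorem intercalate_nil_flatten (l : List (List Char)) : List.intercalate [] l = l.flatten := by
  simp [List.intercalate]
  induction l with
  | nil => rfl
  | cons a t ih => cases t <;> simp_all [List.intersperse]

theorem strJoin_cons (s : String) (l : List String) :
    PySem.Str.join "" (s :: l) = s ++ PySem.Str.join "" l := by
  apply String.ext
  simp [PySem.Str.toList_join, PySem.Chars.join, intercalate_nil_flatten]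

theorem loop_spec (xs : List String) (st : DekBuf) :
    xs.foldl DekStep st =
      ⟨st.giga ++ JoinCat "interface Giga" xs,
       st.fast ++ JoinCat "interface Fast" xs,
       st.descr ++ JoinCat "description" xs,
       st.mode ++ JoinCat "switchport mode" xs,
       st.access ++ JoinCat "switchport access" xs,
       st.trunk ++ (xs.map PySem.Str.strip).filter (fun x => PySem.Str.isIn "switchport trunk allowed" x),
       st.trunkAdd ++ JoinCat "switchport trunk allowed vlan add" xs,
       st.voice ++ JoinCat "switchport voice" xs⟩ := by
  induction xs generalizing st with
  | nil => simp [JoinCat, strJoin_nil]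
  | cons x t ih =>
    rw [List.foldl_cons, ih]
    simp only [JoinCat, List.map_cons, List.filter_cons, DekStep, DekBuf.mk.injEq]
    refine ⟨?_, ?_, ?_, ?_, ?_, ?_, ?_, ?_⟩ <;>
      split_ifs <;> simp_all [strJoin_cons, String.append_assoc]

theorem foldl_append_eq_join (f : String → String) (xs : List String) (acc : String) :
    xs.foldl (fun out linia => out ++ f linia) acc = acc ++ PySem.Str.join "" (xs.map f) := by
  induction xs generalizing acc with
  | nil => simp [strJoin_nil]
  | cons x t ih => simp [ih, strJoin_cons, String.append_assoc]

-- ===== VERDICT (by name: the statement is the Claim_ definition above) =====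
theorem Dekoder_spec : Claim_equal_Dekoder := by
  intro id_sw gniazda _
  show Dekoder id_sw gniazda = Dekoder_alt id_sw gniazda
  unfold Dekoder Dekoder_alt
  rw [PySem.List.foldl_congr_mem gniazda _ (fun out linia => out ++ DekBlock id_sw linia) ""
      (by
        intro out linia _
        show _ = out ++ DekBlock id_sw linia
        simp only [DekBlock, CzyscTab, TrunkDecode, loop_spec, JoinCat, String.empty_append,
          List.nil_append]
        simp [String.append_assoc])]
  rw [foldl_append_eq_join (fun linia => DekBlock id_sw linia) gniazda ""]
  simp
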